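-- pv_equiv track=rewrite | github.com/RamonRomeroTec/ProgrammingPractice | helping/ramon.py | invertir_arreglo
-- ===== SOURCE A (Python) =====
-- def invertir_arreglo(arr):
--     nuevo = []
--     for i, v in enumerate(arr):
--         if i % 2 != 0:
--             nuevo.append(v*-1)
--         else:
--             nuevo.append(v)
--     return nuevo
-- ===== SOURCE B (Python) =====
-- def invertir_arreglo(arr):
--     nuevo = list(arr)
--     nuevo[1::2] = [v * -1 for v in nuevo[1::2]]
--     return nuevo
-- ===== Notes on version B (the rewrite author's own statement) =====
-- stated objective: idiomatic
-- what changed: B replaces the per-element enumerate loop with its if/else parity branch by a copy of the list followed by one bulk reassignment of the odd-index stride slice nuevo[1::2].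
import Mathlib
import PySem

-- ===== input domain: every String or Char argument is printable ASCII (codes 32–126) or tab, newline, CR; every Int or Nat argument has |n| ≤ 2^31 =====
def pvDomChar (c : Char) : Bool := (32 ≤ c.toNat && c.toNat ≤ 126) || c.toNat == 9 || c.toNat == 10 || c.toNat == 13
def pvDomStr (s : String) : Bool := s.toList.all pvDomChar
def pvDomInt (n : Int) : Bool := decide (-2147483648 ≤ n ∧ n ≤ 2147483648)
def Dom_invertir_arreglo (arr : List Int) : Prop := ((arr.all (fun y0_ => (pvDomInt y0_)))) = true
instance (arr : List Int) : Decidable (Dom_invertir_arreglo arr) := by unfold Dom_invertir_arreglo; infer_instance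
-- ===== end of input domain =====

-- B negates the odd-index slice in one bulk strided reassignment instead of A's per-element parity branch (idiomatic; same O(n) cost).

-- ===== PORT A =====
def invertir_arreglo (arr : List Int) : List Int :=
  (PySem.List.enumerate arr 0).foldl
    (fun nuevo p => if p.1 % 2 ≠ 0 then nuevo ++ [p.2 * -1] else nuevo ++ [p.2]) []

-- ===== PORT B =====
-- slice assignment nuevo[1::2] = vals, ported by hand: writes vals into indices 1,3,5,…;
-- exact here because vals has exactly the length of nuevo[1::2].
def setOdds : List Int → List Int → List Int
  | [], _ => []
  | [a], _ => [a]
  | a :: b :: t, [] => a :: b :: t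
  | a :: _ :: t, v :: vs => a :: v :: setOdds t vs

def invertir_arreglo_alt (arr : List Int) : List Int :=
  match PySem.List.slice? arr (some 1) none 2 with
  | none => arr   -- unreachable: step 2 ≠ 0
  | some odds => setOdds arr (odds.map (fun v => v * -1))

-- ===== PRECONDITION & SPEC =====
def Spec_invertir_arreglo (arr : List Int) (out : List Int) : Prop := out = invertir_arreglo_alt arr
instance (arr : List Int) (out : List Int) : Decidable (Spec_invertir_arreglo arr out) := by unfold Spec_invertir_arreglo; infer_instance

-- ===== CLAIM (what is proved, stated in full; the proofs are below) =====
def Claim_equal_invertir_arreglo : Prop := ∀ (arr : List Int), Dom_invertir_arreglo arr → Spec_invertir_arreglo arr (invertir_arreglo arr)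

-- ===== LEMMAS AND PROOFS =====

-- canonical pairwise description of the result, used as the meeting point of both ports
def negOdds : List Int → List Int
  | [] => []
  | [a] => [a]
  | a :: b :: t => a :: b * -1 :: negOdds t

-- the odd-index elements of a list, structurally
def oddsel : List Int → List Int
  | [] => []
  | [_] => []
  | _ :: b :: t => b :: oddsel t

lemma foldl_step_eq_map :
    ∀ (l : List (Int × Int)) (acc : List Int),
      l.foldl (fun nuevo p => if p.1 % 2 ≠ 0 then nuevo ++ [p.2 * -1] else nuevo ++ [p.2]) acc
        = acc ++ l.map (fun p => if p.1 % 2 ≠ 0 then p.2 * -1 else p.2) := by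
  intro l
  induction l with
  | nil => simp
  | cons p t ih =>
    intro acc
    rw [List.foldl_cons, ih, List.map_cons]
    split_ifs <;> simp

lemma map_enumerate_negOdds :
    ∀ (arr : List Int) (s : Int), s % 2 = 0 →
      (PySem.List.enumerate arr s).map (fun p => if p.1 % 2 ≠ 0 then p.2 * -1 else p.2)
        = negOdds arr := by
  intro arr
  induction arr using negOdds.induct with
  | case1 => simp [PySem.List.enumerate_nil, negOdds]
  | case2 a =>
    intro s hs
    simp [PySem.List.enumerate_cons, PySem.List.enumerate_nil, negOdds, hs]
  | case3 a b t ih =>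
    intro s hs
    have h1 : (s + 1) % 2 ≠ 0 := by omega
    have h2 : (s + 2) % 2 = 0 := by omega
    rw [PySem.List.enumerate_cons, PySem.List.enumerate_cons, List.map_cons, List.map_cons,
      show s + 1 + 1 = s + 2 from by ring, ih _ h2]
    simp only [if_neg (show ¬ ((s, a).1 % 2 ≠ 0) from by simpa using hs),
      if_pos (show (s + 1, b).1 % 2 ≠ 0 from h1)]
    rfl

lemma A_eq_negOdds (arr : List Int) : invertir_arreglo arr = negOdds arr := by
  unfold invertir_arreglo
  rw [foldl_step_eq_map, List.nil_append,
    map_enumerate_negOdds arr 0 (by decide)]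

lemma filterMap_range_oddsel :
    ∀ (arr : List Int),
      List.filterMap (fun k : Nat => arr[1 + 2 * k]?) (List.range (arr.length / 2))
        = oddsel arr := by
  intro arr
  induction arr using oddsel.induct with
  | case1 => simp [oddsel]
  | case2 a => simp [oddsel]
  | case3 a b t ih =>
    have hlen : (a :: b :: t).length / 2 = t.length / 2 + 1 := by
      simp [List.length_cons]; omega
    rw [hlen, List.range_succ_eq_map, List.filterMap_cons, List.filterMap_map]
    have hsh : ∀ k : Nat, 1 + 2 * Nat.succ k = (1 + 2 * k) + 1 + 1 := by omega
    simp only [Function.comp, hsh]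
    simp [oddsel, ih]

lemma slice?_eq_oddsel (arr : List Int) :
    PySem.List.slice? arr (some 1) none 2 = some (oddsel arr) := by
  unfold PySem.List.slice? PySem.List.sliceIndices
  simp only [show ¬((2:Int) = 0) by decide, if_false, show ¬((2:Int) < 0) by decide]
  rcases arr with _ | ⟨a, t⟩
  · simp [oddsel]
  · rcases t with _ | ⟨b, t⟩
    · simp [oddsel]
    · have hn : (1:Int) < (a :: b :: t).length := by
        simp [List.length_cons]
      have hmin : min (1:Int) ((a :: b :: t).length : Int) = 1 := by omega
      simp only [if_neg (show ¬((1:Int) < 0) from by decide), hmin,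
        if_pos (show (0:Int) < 2 from by decide), if_pos hn]
      have hcount : ((((a :: b :: t).length : Int) - 1 + 2 - 1) / 2).toNat
          = (a :: b :: t).length / 2 := by
        rcases Nat.even_or_odd (a :: b :: t).length with ⟨m, hm⟩ | ⟨m, hm⟩ <;>
          · rw [hm]; omega
      rw [hcount]
      have hfix : ∀ k : Nat, ((1 : Int) + 2 * (k : Int)).toNat = 1 + 2 * k := by
        intro k; omega
      simp only [hfix]
      rw [filterMap_range_oddsel]

lemma setOdds_oddsel : ∀ (arr : List Int),
    setOdds arr ((oddsel arr).map (fun v => v * -1)) = negOdds arr := by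
  intro arr
  induction arr using oddsel.induct with
  | case1 => rfl
  | case2 a => rfl
  | case3 a b t ih =>
    simp only [oddsel, List.map_cons, setOdds, negOdds]
    rw [ih]

lemma B_eq_negOdds (arr : List Int) : invertir_arreglo_alt arr = negOdds arr := by
  unfold invertir_arreglo_alt
  rw [slice?_eq_oddsel]
  exact setOdds_oddsel arr

-- ===== VERDICT (by name: the statement is the Claim_ definition above) =====
theorem invertir_arreglo_spec : Claim_equal_invertir_arreglo := by
  intro arr _
  unfold Spec_invertir_arreglo
  rw [A_eq_negOdds, B_eq_negOdds]
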